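-- pv_equiv track=rewrite | github.com/dovanphuong2704/ai-data-platform | server/src/scripts/test-vanna.py | build_ddl
-- ===== SOURCE A (Python) =====
-- def build_ddl(tables, columns, fks):
--     """Build DDL statements for Vanna training"""
--     # Group columns by table
--     col_map = {}
--     for schema, table, col, dtype in columns:
--         key = f"{schema}.{table}"
--         if key not in col_map:
--             col_map[key] = []
--         col_map[key].append(f"  {col} {dtype}")
--
--     # Group FKs by table
--     fk_map = {}
--     for schema, table, col, fschema, ftable, fcol in fks:
--         key = f"{schema}.{table}"
--         if key not in fk_map:
--             fk_map[key] = []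
--         fk_map[key].append(f"  FK: {col} -> {fschema}.{ftable}.{fcol}")
--
--     lines = []
--     for schema, table in tables:
--         key = f"{schema}.{table}"
--         lines.append(f"CREATE TABLE {schema}.{table} (")
--
--         if key in fk_map:
--             lines.extend(fk_map[key])
--         if key in col_map:
--             lines.extend(col_map[key])
--
--         lines.append(");")
--         lines.append("")
--
--     return "\n".join(lines)
-- ===== SOURCE B (Python) =====
-- def build_ddl(tables, columns, fks):
--     """Build DDL statements for Vanna training"""
--     lines = []
--     for schema, table in tables:
--         key = f"{schema}.{table}"
--         lines.append(f"CREATE TABLE {schema}.{table} (")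
--         for s, t, col, fschema, ftable, fcol in fks:
--             if f"{s}.{t}" == key:
--                 lines.append(f"  FK: {col} -> {fschema}.{ftable}.{fcol}")
--         for s, t, col, dtype in columns:
--             if f"{s}.{t}" == key:
--                 lines.append(f"  {col} {dtype}")
--         lines.append(");")
--         lines.append("")
--     return "\n".join(lines)
-- ===== Notes on version B (the rewrite author's own statement) =====
-- stated objective: simpler
-- what changed: Drops the two pre-grouping dicts entirely: B emits lines in one pass over tables, filtering the full fks and columns lists per table by the same schema.table key string, so no index is built.
import Mathlib
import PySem

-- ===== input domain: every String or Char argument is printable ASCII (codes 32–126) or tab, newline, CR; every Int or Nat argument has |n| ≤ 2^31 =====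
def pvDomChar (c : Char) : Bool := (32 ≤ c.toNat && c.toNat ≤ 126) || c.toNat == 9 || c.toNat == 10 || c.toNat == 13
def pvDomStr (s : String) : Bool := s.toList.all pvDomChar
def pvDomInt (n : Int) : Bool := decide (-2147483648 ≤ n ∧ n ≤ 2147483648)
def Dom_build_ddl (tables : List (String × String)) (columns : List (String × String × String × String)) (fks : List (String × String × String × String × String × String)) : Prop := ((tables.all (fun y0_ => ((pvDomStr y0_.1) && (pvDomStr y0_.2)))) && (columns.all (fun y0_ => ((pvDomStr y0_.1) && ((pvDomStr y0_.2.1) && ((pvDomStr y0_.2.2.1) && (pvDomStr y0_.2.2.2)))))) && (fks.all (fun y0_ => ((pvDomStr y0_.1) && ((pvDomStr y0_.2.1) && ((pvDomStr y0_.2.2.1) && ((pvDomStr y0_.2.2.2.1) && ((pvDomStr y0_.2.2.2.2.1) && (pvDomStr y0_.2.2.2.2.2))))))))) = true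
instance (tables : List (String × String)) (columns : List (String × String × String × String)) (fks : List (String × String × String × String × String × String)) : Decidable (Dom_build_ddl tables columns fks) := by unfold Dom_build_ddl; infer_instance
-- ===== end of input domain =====

-- B drops A's two pre-grouping dicts and emits lines in one pass over tables, filtering the
-- full fks/columns lists per table by the same "schema.table" key string (objective: simpler).

-- ===== PORT A =====
def build_ddl (tables : List (String × String)) (columns : List (String × String × String × String)) (fks : List (String × String × String × String × String × String)) : String :=
  -- Group columns by table
  let colMap : PySem.Dict String (List String) := columns.foldl (fun d c =>
    let key := c.1 ++ "." ++ c.2.1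
    let d := if d.contains key then d else d.insert key []
    d.modify key [] (fun v => v ++ ["  " ++ c.2.2.1 ++ " " ++ c.2.2.2])) PySem.Dict.empty
  -- Group FKs by table
  let fkMap : PySem.Dict String (List String) := fks.foldl (fun d f =>
    let key := f.1 ++ "." ++ f.2.1
    let d := if d.contains key then d else d.insert key []
    d.modify key [] (fun v => v ++ ["  FK: " ++ f.2.2.1 ++ " -> " ++ f.2.2.2.1 ++ "." ++ f.2.2.2.2.1 ++ "." ++ f.2.2.2.2.2])) PySem.Dict.empty
  let lines : List String := tables.foldl (fun acc t =>
    let key := t.1 ++ "." ++ t.2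
    let acc := acc ++ ["CREATE TABLE " ++ t.1 ++ "." ++ t.2 ++ " ("]
    let acc := if fkMap.contains key then acc ++ fkMap.getD key [] else acc
    let acc := if colMap.contains key then acc ++ colMap.getD key [] else acc
    acc ++ [");", ""]) []
  PySem.Str.join "\n" lines

-- ===== PORT B =====
def build_ddl_alt (tables : List (String × String)) (columns : List (String × String × String × String)) (fks : List (String × String × String × String × String × String)) : String :=
  let lines : List String := tables.foldl (fun acc t =>
    let key := t.1 ++ "." ++ t.2
    let acc := acc ++ ["CREATE TABLE " ++ t.1 ++ "." ++ t.2 ++ " ("]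
    let acc := fks.foldl (fun acc f =>
      if f.1 ++ "." ++ f.2.1 == key then acc ++ ["  FK: " ++ f.2.2.1 ++ " -> " ++ f.2.2.2.1 ++ "." ++ f.2.2.2.2.1 ++ "." ++ f.2.2.2.2.2] else acc) acc
    let acc := columns.foldl (fun acc c =>
      if c.1 ++ "." ++ c.2.1 == key then acc ++ ["  " ++ c.2.2.1 ++ " " ++ c.2.2.2] else acc) acc
    acc ++ [");", ""]) []
  PySem.Str.join "\n" lines

-- ===== PRECONDITION & SPEC =====
def Spec_build_ddl (tables : List (String × String)) (columns : List (String × String × String × String)) (fks : List (String × String × String × String × String × String)) (out : String) : Prop := out = build_ddl_alt tables columns fks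
instance (tables : List (String × String)) (columns : List (String × String × String × String)) (fks : List (String × String × String × String × String × String)) (out : String) : Decidable (Spec_build_ddl tables columns fks out) := by unfold Spec_build_ddl; infer_instance

-- ===== CLAIM (what is proved, stated in full; the proofs are below) =====
def Claim_equal_build_ddl : Prop := ∀ (tables : List (String × String)) (columns : List (String × String × String × String)) (fks : List (String × String × String × String × String × String)), Dom_build_ddl tables columns fks → Spec_build_ddl tables columns fks (build_ddl tables columns fks)

-- ===== LEMMAS AND PROOFS =====

-- A's "if key not in d: d[key]=[]" followed by append is one modify step.
theorem pv_step_modify (d : PySem.Dict String (List String)) (k : String) (f : List String → List String) :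
    (if d.contains k then d else d.insert k []).modify k [] f = d.modify k [] f := by
  by_cases h : d.contains k = true
  · simp [h]
  · simp only [h, if_neg, Bool.false_eq_true, not_false_eq_true]
    show (d.insert k []).insert k (f ((d.insert k []).getD k [])) = d.insert k (f (d.getD k []))
    rw [PySem.Dict.getD_insert_self, PySem.Dict.insert_insert_self,
        PySem.Dict.getD_of_not_contains d [] (by simpa using h)]

-- A's grouping fold, read back: the entry at k is the formatted filter of the source list.
theorem pv_group_getD {α : Type} (l : List α) (key : α → String) (fmt : α → String) (k : String) :
    ((l.foldl (fun d x =>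
        let ky := key x
        let d := if d.contains ky then d else d.insert ky []
        d.modify ky [] (fun v => v ++ [fmt x])) PySem.Dict.empty).getD k [])
      = (l.filter (fun x => key x == k)).map fmt := by
  have h1 : (l.foldl (fun d x =>
        let ky := key x
        let d := if d.contains ky then d else d.insert ky []
        d.modify ky [] (fun v => v ++ [fmt x])) PySem.Dict.empty)
      = (l.map (fun x => (key x, fmt x))).foldl (fun d p => d.modify p.1 [] (fun v => v ++ [p.2])) PySem.Dict.empty := by
    rw [List.foldl_map]
    exact PySem.List.foldl_congr_mem _ _ _ _ (fun d x _ => pv_step_modify d (key x) _)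
  rw [h1, PySem.Dict.getD_foldl_modify_append, PySem.Dict.getD_empty, List.nil_append,
      List.filter_map]
  simp [Function.comp_def, List.map_map]

theorem pv_if_contains_getD (d : PySem.Dict String (List String)) (k : String) (acc : List String) :
    (if d.contains k then acc ++ d.getD k [] else acc) = acc ++ d.getD k [] := by
  by_cases h : d.contains k = true
  · simp [h]
  · simp [h, PySem.Dict.getD_of_not_contains d [] (by simpa using h)]

-- ===== VERDICT (by name: the statement is the Claim_ definition above) =====
theorem build_ddl_spec : Claim_equal_build_ddl := by
  intro tables columns fks _
  show build_ddl tables columns fks = build_ddl_alt tables columns fks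
  unfold build_ddl build_ddl_alt
  dsimp only
  congr 1
  apply PySem.List.foldl_congr_mem
  intro acc t _
  rw [pv_if_contains_getD, pv_if_contains_getD,
      pv_group_getD fks (fun f => f.1 ++ "." ++ f.2.1) _ (t.1 ++ "." ++ t.2),
      pv_group_getD columns (fun c => c.1 ++ "." ++ c.2.1) _ (t.1 ++ "." ++ t.2),
      PySem.List.foldl_append_if, PySem.List.foldl_append_if]
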